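-- pv_equiv track=rewrite | github.com/DarkDragoon2002/UBSGlobalCodingChallenge2025 | routes/safeguard.py | inv_encode_index_parity
-- ===== SOURCE A (Python) =====
-- def inv_encode_index_parity(s: str) -> str:
--     # Inverse of: even indices first, then odd indices (0-based), per word
--     def inv_word(w):
--         n = len(w)
--         evens_len = (n + 1) // 2
--         evens = list(w[:evens_len])
--         odds = list(w[evens_len:])
--         out = [''] * n
--         ei = 0
--         oi = 0
--         for i in range(n):
--             if i % 2 == 0:
--                 out[i] = evens[ei]
--                 ei += 1
--             else:
--                 out[i] = odds[oi]
--                 oi += 1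
--         return "".join(out)
--     return " ".join(inv_word(w) for w in s.split(" "))
-- ===== SOURCE B (Python) =====
-- def inv_encode_index_parity(s: str) -> str:
--     # Decorate-sort-undecorate: tag each encoded char with its original index and sort,
--     # instead of splitting into halves and interleaving with counters.
--     def inv_word(w):
--         k = (len(w) + 1) // 2
--         pairs = [(2 * j if j < k else 2 * (j - k) + 1, c) for j, c in enumerate(w)]
--         return "".join(c for _, c in sorted(pairs, key=lambda t: t[0]))
--
--     return " ".join(inv_word(w) for w in s.split(" "))
-- ===== Notes on version B (the rewrite author's own statement) =====
-- stated objective: alternative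
-- what changed: Replaces A's preallocated output list filled by an index loop with an i%2 branch and two running counters by decorate-sort-undecorate: each encoded character is tagged with its original index (2j for the first half, 2(j-k)+1 for the second) and the pairs are sorted by that index.
import Mathlib
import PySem

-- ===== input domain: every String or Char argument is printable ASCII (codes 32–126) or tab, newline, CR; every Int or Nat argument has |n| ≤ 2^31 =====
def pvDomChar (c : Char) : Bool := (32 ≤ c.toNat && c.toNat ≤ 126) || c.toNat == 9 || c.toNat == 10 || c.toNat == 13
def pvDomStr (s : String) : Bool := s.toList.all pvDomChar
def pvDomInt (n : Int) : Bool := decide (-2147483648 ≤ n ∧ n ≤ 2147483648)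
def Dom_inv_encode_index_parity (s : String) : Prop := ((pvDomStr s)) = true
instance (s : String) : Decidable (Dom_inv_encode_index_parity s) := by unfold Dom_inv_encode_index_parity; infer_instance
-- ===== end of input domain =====

-- B replaces A's preallocated-list index loop (i%2 branch, two counters) by decorate-sort-undecorate: tag each encoded char with its original index and sort; objective: alternative.


-- ===== PORT A =====
-- one loop iteration of A's `for i in range(n)` (state: out list, ei, oi)
def pvLoopA (evens odds : List Char) (st : List (List Char) × Nat × Nat) (i : Int) :
    List (List Char) × Nat × Nat :=
  if PySem.Int.mod i 2 = 0 then
    (st.1.set i.toNat [evens.getD st.2.1 ' '], st.2.1 + 1, st.2.2)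
  else
    (st.1.set i.toNat [odds.getD st.2.2 ' '], st.2.1, st.2.2 + 1)

-- A's inv_word
def pvInvWordA (w : List Char) : List Char :=
  let n := w.length
  let evensLen : Nat := (n + 1) / 2
  let evens := PySem.List.slice w none (some (evensLen : Int))
  let odds := PySem.List.slice w (some (evensLen : Int)) none
  let st := (PySem.List.pyRange 0 (n : Int) 1).foldl (pvLoopA evens odds)
      (List.replicate n ([] : List Char), 0, 0)
  PySem.Chars.join [] st.1

def inv_encode_index_parity (s : String) : String :=
  String.ofList (PySem.Chars.join [' '] ((PySem.Chars.splitOn s.toList [' ']).map pvInvWordA))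

-- ===== PORT B =====
-- B's inv_word: tag each encoded char with its original index, sort by it, drop the tags
def pvInvWordB (w : List Char) : List Char :=
  let k : Int := (((w.length + 1) / 2 : Nat) : Int)
  let pairs := (PySem.List.enumerate w).map
    (fun jc => (if jc.1 < k then 2 * jc.1 else 2 * (jc.1 - k) + 1, jc.2))
  (PySem.List.sorted pairs (fun t => t.1)).map (fun t => t.2)

def inv_encode_index_parity_alt (s : String) : String :=
  String.ofList (PySem.Chars.join [' '] ((PySem.Chars.splitOn s.toList [' ']).map pvInvWordB))

-- ===== PRECONDITION & SPEC =====
def Spec_inv_encode_index_parity (s : String) (out : String) : Prop := out = inv_encode_index_parity_alt s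
instance (s : String) (out : String) : Decidable (Spec_inv_encode_index_parity s out) := by unfold Spec_inv_encode_index_parity; infer_instance

-- ===== CLAIM (what is proved, stated in full; the proofs are below) =====
def Claim_equal_inv_encode_index_parity : Prop := ∀ (s : String), Dom_inv_encode_index_parity s → Spec_inv_encode_index_parity s (inv_encode_index_parity s)

-- ===== LEMMAS AND PROOFS =====

-- the per-position value A's loop writes (as a character)
def pvPick (evens odds : List Char) (i : Nat) : Char :=
  if i % 2 = 0 then evens.getD (i / 2) ' ' else odds.getD (i / 2) ' '

theorem pvJoinNil (l : List (List Char)) : PySem.Chars.join [] l = l.flatten := by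
  induction l with
  | nil => simp [PySem.Chars.join, List.intercalate]
  | cons p r ih =>
    cases r with
    | nil => simp [PySem.Chars.join, List.intercalate]
    | cons q t => rw [PySem.Chars.join_cons_cons, ih]; simp

-- invariant of A's loop after n of N iterations
theorem pvLoopA_spec (evens odds : List Char) (N : Nat) :
    ∀ n, n ≤ N →
      (PySem.List.pyRange 0 (n : Int) 1).foldl (pvLoopA evens odds)
        (List.replicate N ([] : List Char), 0, 0)
      = ((List.range n).map (fun i => [pvPick evens odds i]) ++ List.replicate (N - n) [],
         (n + 1) / 2, n / 2) := by
  intro n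
  induction n with
  | zero => intro _; simp [PySem.List.pyRange]
  | succ n ih =>
    intro hle
    have h1 : ((n + 1 : Nat) : Int) = (n : Int) + 1 := by push_cast; ring
    rw [h1, PySem.List.pyRange_one_succ_right (by positivity), List.foldl_append,
        ih (by omega)]
    simp only [List.foldl_cons, List.foldl_nil]
    unfold pvLoopA
    have hmod : PySem.Int.mod (n : Int) 2 = ((n % 2 : Nat) : Int) := PySem.Int.mod_natCast n 2
    have hlen : ((List.range n).map (fun i => [pvPick evens odds i])).length = n := by simp
    have hrep : List.replicate (N - n) ([] : List Char)
        = ([] : List Char) :: List.replicate (N - (n + 1)) [] := by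
      have : N - n = (N - (n + 1)) + 1 := by omega
      rw [this, List.replicate_succ]
    rcases Nat.even_or_odd n with he | ho
    · have hn2 : n % 2 = 0 := Nat.even_iff.mp he
      rw [if_pos (by rw [hmod, hn2]; rfl)]
      simp only [Int.toNat_natCast]
      rw [List.set_append_right _ _ (by omega), hrep]
      simp only [hlen, Nat.sub_self, List.set_cons_zero]
      rw [List.range_succ, List.map_append]
      have : (n + 1) / 2 = n / 2 := by omega
      simp [pvPick, hn2, this]
      omega
    · have hn2 : n % 2 = 1 := Nat.odd_iff.mp ho
      rw [if_neg (by rw [hmod, hn2]; decide)]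
      simp only [Int.toNat_natCast]
      rw [List.set_append_right _ _ (by omega), hrep]
      simp only [hlen, Nat.sub_self, List.set_cons_zero]
      rw [List.range_succ, List.map_append]
      simp [pvPick, hn2]
      omega

-- A's inv_word computes the position-indexed gather
theorem pvA_eq (w : List Char) :
    pvInvWordA w
      = (List.range w.length).map
          (pvPick (w.take ((w.length + 1) / 2)) (w.drop ((w.length + 1) / 2))) := by
  simp only [pvInvWordA]
  have h0 : (0:Int) ≤ (((w.length + 1) / 2 : Nat) : Int) := by positivity
  rw [PySem.List.slice_to w h0, PySem.List.slice_from w h0]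
  simp only [Int.toNat_natCast]
  rw [pvLoopA_spec _ _ w.length w.length le_rfl]
  simp only [Nat.sub_self, List.replicate_zero, List.append_nil]
  rw [pvJoinNil]
  induction (List.range w.length) with
  | nil => simp
  | cons a l ih => simp_all

-- shifting pvPick by two strips the heads of both halves
theorem pvPick_shift (x y : Char) (xs ys : List Char) (i : Nat) :
    pvPick (x :: xs) (y :: ys) (i + 2) = pvPick xs ys i := by
  have hm : (i + 2) % 2 = i % 2 := by omega
  have hd : (i + 2) / 2 = i / 2 + 1 := by omega
  simp [pvPick, hm, hd]

-- the map over range (m+1) as head :: shifted map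
theorem pvRangeSuccMap (m : Nat) (g : Nat → Int × Char) :
    (List.range (m + 1)).map g = g 0 :: (List.range m).map (fun j => g (j + 1)) := by
  rw [List.range_succ_eq_map]
  simp [List.map_map, Function.comp]

-- the tagged gather list is a permutation of evens-tags ++ odds-tags
theorem pvPermAux (e : List Char) : ∀ (o : List Char) (off : Nat),
    o.length ≤ e.length → e.length ≤ o.length + 1 →
    ((List.range (e.length + o.length)).map
        (fun i => (((off + i : Nat) : Int), pvPick e o i))).Perm
      (((List.range e.length).map (fun j => (((off + 2*j : Nat) : Int), e.getD j ' '))) ++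
       ((List.range o.length).map (fun m => (((off + 2*m + 1 : Nat) : Int), o.getD m ' ')))) := by
  induction e with
  | nil =>
    intro o off h1 _
    cases o with
    | nil => simp
    | cons a t => simp at h1
  | cons x xs ih =>
    intro o off h1 h2
    cases o with
    | nil =>
      have : xs = [] := by simpa using h2
      subst this
      simp [pvPick]
    | cons y ys =>
      have hn : (x :: xs).length + (y :: ys).length = (xs.length + ys.length) + 1 + 1 := by
        simp; omega
      rw [hn, pvRangeSuccMap, pvRangeSuccMap]
      have hL : (List.range (xs.length + ys.length)).map
            (fun i => (fun i => (((off + i : Nat) : Int), pvPick (x :: xs) (y :: ys) i)) (i + 1 + 1))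
          = (List.range (xs.length + ys.length)).map
            (fun i => ((((off + 2) + i : Nat) : Int), pvPick xs ys i)) := by
        apply List.map_congr_left
        intro i _
        show (((off + (i + 1 + 1) : Nat) : Int), pvPick (x :: xs) (y :: ys) (i + 1 + 1))
            = ((((off + 2) + i : Nat) : Int), pvPick xs ys i)
        rw [show i + 1 + 1 = i + 2 from rfl, pvPick_shift]
        congr 2
        omega
      rw [hL]
      have hE : (List.range (x :: xs).length).map
            (fun j => (((off + 2*j : Nat) : Int), (x :: xs).getD j ' '))
          = (((off : Nat) : Int), x) ::
            (List.range xs.length).map (fun j => ((((off + 2) + 2*j : Nat) : Int), xs.getD j ' ')) := by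
        rw [show (x :: xs).length = xs.length + 1 from rfl, pvRangeSuccMap]
        congr 1
        apply List.map_congr_left
        intro j _
        have : off + 2*(j + 1) = (off + 2) + 2*j := by omega
        simp [this]
      have hO : (List.range (y :: ys).length).map
            (fun m => (((off + 2*m + 1 : Nat) : Int), (y :: ys).getD m ' '))
          = (((off + 1 : Nat) : Int), y) ::
            (List.range ys.length).map (fun m => ((((off + 2) + 2*m + 1 : Nat) : Int), ys.getD m ' ')) := by
        rw [show (y :: ys).length = ys.length + 1 from rfl, pvRangeSuccMap]
        congr 1
        apply List.map_congr_left
        intro m _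
        have : off + 2*(m + 1) + 1 = (off + 2) + 2*m + 1 := by omega
        simp [this]
      rw [hE, hO]
      have h0 : (((off + 0 : Nat) : Int), pvPick (x :: xs) (y :: ys) 0) = (((off : Nat) : Int), x) := by
        simp [pvPick]
      have h1' : (((off + (0 + 1) : Nat) : Int), pvPick (x :: xs) (y :: ys) (0 + 1))
          = (((off + 1 : Nat) : Int), y) := by
        simp [pvPick]
      rw [h0, h1']
      refine List.Perm.cons _ ?_
      refine ((List.Perm.cons _ (ih ys (off + 2) (by simp at h1; omega) (by simp at h2; omega))).trans ?_)
      exact List.perm_middle.symm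

-- B's tagged pairs are exactly evens-tags ++ odds-tags
theorem pvPairs_eq (w : List Char) :
    ((PySem.List.enumerate w).map
      (fun jc => (if jc.1 < (((w.length + 1) / 2 : Nat) : Int)
          then 2 * jc.1 else 2 * (jc.1 - (((w.length + 1) / 2 : Nat) : Int)) + 1, jc.2)))
    = (((List.range (w.take ((w.length + 1) / 2)).length).map
          (fun j => (((0 + 2*j : Nat) : Int), (w.take ((w.length + 1) / 2)).getD j ' '))) ++
       ((List.range (w.drop ((w.length + 1) / 2)).length).map
          (fun m => (((0 + 2*m + 1 : Nat) : Int), (w.drop ((w.length + 1) / 2)).getD m ' ')))) := by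
  have hk : (w.length + 1) / 2 ≤ w.length := by omega
  have hte : (w.take ((w.length + 1) / 2)).length = (w.length + 1) / 2 := by
    simp [List.length_take]; omega
  have hto : (w.drop ((w.length + 1) / 2)).length = w.length - (w.length + 1) / 2 := by
    simp
  apply List.ext_getElem
  · simp [PySem.List.length_enumerate, hte, hto]; omega
  · intro i hi1 hi2
    have hiw : i < w.length := by
      simpa [PySem.List.length_enumerate] using hi1
    rw [List.getElem_map, PySem.List.getElem_enumerate]
    by_cases hik : i < (w.length + 1) / 2
    · rw [List.getElem_append_left (by simp [hte]; omega)]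
      rw [List.getElem_map, List.getElem_range]
      have : ((0:Int) + i) < (((w.length + 1) / 2 : Nat) : Int) := by
        push_cast; omega
      rw [if_pos this]
      simp only [Prod.mk.injEq]
      constructor
      · push_cast; ring
      · rw [List.getD_eq_getElem _ _ (by omega : i < (w.take ((w.length+1)/2)).length)]
        simp [List.getElem_take]
    · have hnlt : ¬ ((0:Int) + i) < (((w.length + 1) / 2 : Nat) : Int) := by push_cast; omega
      rw [List.getElem_append_right (by simp [hte]; omega)]
      simp only [List.length_map, List.length_range, List.getElem_map, List.getElem_range, hte]
      rw [if_neg hnlt]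
      simp only [Prod.mk.injEq]
      refine ⟨by push_cast; omega, ?_⟩
      rw [List.getD_eq_getElem _ _
        (by rw [hto]; omega : i - (w.length + 1) / 2 < (w.drop ((w.length + 1) / 2)).length)]
      rw [List.getElem_drop]
      congr 1
      omega

theorem pvInvWord_eq (w : List Char) : pvInvWordA w = pvInvWordB w := by
  rw [pvA_eq]
  simp only [pvInvWordB]
  set e := w.take ((w.length + 1) / 2) with he
  set o := w.drop ((w.length + 1) / 2) with ho
  have hte : e.length = (w.length + 1) / 2 := by
    simp [he, List.length_take]; omega
  have hto : o.length = w.length - (w.length + 1) / 2 := by simp [ho]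
  have hn : e.length + o.length = w.length := by omega
  -- the sorted pairs are the gather list, tagged with their positions
  have hsorted :
      PySem.List.sorted
        ((PySem.List.enumerate w).map
          (fun jc => (if jc.1 < (((w.length + 1) / 2 : Nat) : Int)
              then 2 * jc.1 else 2 * (jc.1 - (((w.length + 1) / 2 : Nat) : Int)) + 1, jc.2)))
        (fun t => t.1)
      = (List.range w.length).map (fun i => (((0 + i : Nat) : Int), pvPick e o i)) := by
    apply PySem.List.sorted_eq_of_perm_of_pairwise_lt
    · rw [pvPairs_eq, ← he, ← ho, ← hn]
      exact pvPermAux e o 0 (by omega) (by omega)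
    · rw [← hn]
      have := pvPermAux e o 0 (by omega) (by omega)
      refine List.Pairwise.map _ ?_ (List.pairwise_lt_range)
      intro a b hab
      push_cast
      omega
  rw [hsorted, List.map_map]
  apply List.map_congr_left
  intro i _
  rfl

-- ===== VERDICT (by name: the statement is the Claim_ definition above) =====
theorem inv_encode_index_parity_spec : Claim_equal_inv_encode_index_parity := by
  intro s _
  unfold Spec_inv_encode_index_parity inv_encode_index_parity inv_encode_index_parity_alt
  rw [List.map_congr_left (fun w _ => pvInvWord_eq w)]
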